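-- pv_equiv track=rewrite | github.com/ASSERT-KTH/Mokav | experiments/pynguin/c4b/return-lst/generated_tests/src_509/5/src_509.py | func
-- ===== SOURCE A (Python) =====
-- def func(*args):
-- 	ret_values = []
--
--
-- 	def f(c):
-- 	    return ((c == 'A') or (c == 'E') or (c == 'I') or (c == 'O') or (c == 'U') or (c == 'Y'))
-- 	s = args[0].split()[0]
-- 	a = ([0] * len(s))
-- 	for i in range(len(s)):
-- 	    a[i] = (s[i], (i + 1))
-- 	a = [elem for (letter, elem) in a if f(letter)]
-- 	b = ([0] * len(a))
-- 	if (len(a) != 0):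
-- 	    b[0] = a[0]
-- 	    for i in range(1, len(a)):
-- 	        b[i] = (a[i] - a[(i - 1)])
-- 	    b.append(((len(s) + 1) - a[(len(a) - 1)]))
-- 	    ret_values.append(max(b))
-- 	else:
-- 	    ret_values.append((len(s) + 1))
--
-- 	return ret_values
-- ===== SOURCE B (Python) =====
-- def func(*args):
--     s = args[0].split()[0]
--     prev = 0
--     best = None
--     for i, c in enumerate(s):
--         if c in 'AEIOUY':
--             gap = i + 1 - prev
--             best = gap if best is None else max(best, gap)
--             prev = i + 1
--     trailing = len(s) + 1 - prev
--     best = trailing if best is None else max(best, trailing)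
--     return [best]
-- ===== Notes on version B (the rewrite author's own statement) =====
-- stated objective: simpler
-- what changed: Replaces A's three sequential list builds (enumerate-pairs list, filtered vowel-positions list, gaps list) and a final max() over the gaps list with one fused pass over the word that maintains only the previous vowel position and a running maximum.
import Mathlib
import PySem

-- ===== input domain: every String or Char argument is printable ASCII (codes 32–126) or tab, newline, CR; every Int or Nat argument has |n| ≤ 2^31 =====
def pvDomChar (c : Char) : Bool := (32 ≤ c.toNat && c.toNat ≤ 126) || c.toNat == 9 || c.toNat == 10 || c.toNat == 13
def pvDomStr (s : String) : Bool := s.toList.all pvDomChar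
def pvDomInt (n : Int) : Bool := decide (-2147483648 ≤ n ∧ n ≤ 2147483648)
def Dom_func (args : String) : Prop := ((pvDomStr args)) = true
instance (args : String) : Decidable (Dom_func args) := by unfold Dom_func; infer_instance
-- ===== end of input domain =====

-- B fuses A's three list builds into one pass keeping only the previous vowel position and a running maximum (objective: simpler).

-- ===== PORT A =====
-- def f(c): uppercase-vowel test
def pvF (c : Char) : Bool :=
  (c == 'A') || (c == 'E') || (c == 'I') || (c == 'O') || (c == 'U') || (c == 'Y')

-- the loop 'for i in range(1, len(a)): b[i] = a[i] - a[i-1]' as a structural recursion over a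
def pvDiffs : Int → List Int → List Int
  | _, [] => []
  | prev, x :: xs => (x - prev) :: pvDiffs x xs

def func (args : String) : List Int :=
  match (PySem.Str.split₀ args) with
  | [] => []   -- args[0].split()[0] raises IndexError; excluded by Pre_func
  | w :: _ =>
    let s := w.toList
    let n : Int := (s.length : Int)
    -- a[i] = (s[i], i+1)
    let a0 : List (Char × Int) := s.zipIdx.map (fun p => (p.1, (p.2 : Int) + 1))
    -- a = [elem for (letter, elem) in a if f(letter)]
    let a : List Int := (a0.filter (fun p => pvF p.1)).map Prod.snd
    match a with
    | [] => [n + 1]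
    | x :: xs =>
      let b : List Int := (x :: pvDiffs x xs) ++ [(n + 1) - (x :: xs).getLast (by simp)]
      [(PySem.List.max? b (fun y => y)).getD 0]

-- ===== PORT B =====
-- the single pass of Source B: state = (prev, best)
def pvAltLoop : List (Char × Nat) → Int → Option Int → Int × Option Int
  | [], prev, best => (prev, best)
  | (c, i) :: rest, prev, best =>
    if pvF c then
      let gap : Int := (i : Int) + 1 - prev
      pvAltLoop rest ((i : Int) + 1)
        (some (match best with | none => gap | some b => max b gap))
    else pvAltLoop rest prev best

def func_alt (args : String) : List Int :=
  match (PySem.Str.split₀ args) with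
  | [] => []   -- same IndexError; excluded by Pre_func
  | w :: _ =>
    let s := w.toList
    let pb := pvAltLoop s.zipIdx 0 none
    let trailing : Int := (s.length : Int) + 1 - pb.1
    [match pb.2 with | none => trailing | some b => max b trailing]

-- ===== PRECONDITION & SPEC =====
-- A raises IndexError when args has no whitespace-separated word (args.split() == []); both ports return there only formally.
def Pre_func (args : String) : Prop := PySem.Str.split₀ args ≠ []
instance (args : String) : Decidable (Pre_func args) := by unfold Pre_func; infer_instance
def pvWitness_func : String := "bYe"

def Spec_func (args : String) (out : List Int) : Prop := out = func_alt args
instance (args : String) (out : List Int) : Decidable (Spec_func args out) := by unfold Spec_func; infer_instance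

-- ===== CLAIM (what is proved, stated in full; the proofs are below) =====
def Claim_equal_func : Prop := ∀ (args : String), Dom_func args → Pre_func args → Spec_func args (func args)

-- ===== LEMMAS AND PROOFS =====

-- positions of vowels (1-indexed), extracted from an enumerated char list
def pvPos (l : List (Char × Nat)) : List Int :=
  l.filterMap (fun p => if pvF p.1 then some ((p.2 : Int) + 1) else none)

-- B's loop over positions only
def pvPLoop : List Int → Int → Option Int → Int × Option Int
  | [], prev, best => (prev, best)
  | x :: xs, prev, best =>
      pvPLoop xs x (some (match best with | none => x - prev | some b => max b (x - prev)))

theorem pvAltLoop_eq_pLoop (l : List (Char × Nat)) (prev : Int) (best : Option Int) :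
    pvAltLoop l prev best = pvPLoop (pvPos l) prev best := by
  induction l generalizing prev best with
  | nil => simp [pvAltLoop, pvPos, pvPLoop]
  | cons hd tl ih =>
    obtain ⟨c, i⟩ := hd
    by_cases h : pvF c <;> simp [pvAltLoop, pvPos, pvPLoop, h, ih]

theorem pvA_list_eq_pos (l : List (Char × Nat)) :
    ((l.map (fun p => (p.1, (p.2 : Int) + 1))).filter (fun p => pvF p.1)).map Prod.snd
      = pvPos l := by
  induction l with
  | nil => simp [pvPos]
  | cons hd tl ih =>
    obtain ⟨c, i⟩ := hd
    by_cases h : pvF c <;> simp [pvPos, h] at ih ⊢ <;> simpa [pvPos] using ih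

-- optional running max fold
def pvMFold (acc : Option Int) : List Int → Option Int
  | [] => acc
  | g :: gs => pvMFold (some (match acc with | none => g | some b => max b g)) gs

theorem pvPLoop_char (xs : List Int) (x prev : Int) (best : Option Int) :
    pvPLoop (x :: xs) prev best
      = ((x :: xs).getLast (by simp), pvMFold best ((x - prev) :: pvDiffs x xs)) := by
  induction xs generalizing x prev best with
  | nil => simp [pvPLoop, pvMFold, pvDiffs]
  | cons y ys ih =>
    rw [show pvPLoop (x :: y :: ys) prev best
          = pvPLoop (y :: ys) x
              (some (match best with | none => x - prev | some b => max b (x - prev))) from rfl,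
        ih]
    simp [pvMFold, pvDiffs]

theorem pvMFold_some (a : Int) (l : List Int) :
    pvMFold (some a) l = some (l.foldl max a) := by
  induction l generalizing a with
  | nil => simp [pvMFold]
  | cons g gs ih => simp [pvMFold, ih]

theorem func_eq_alt (args : String) (h : Pre_func args) : func args = func_alt args := by
  unfold func func_alt
  cases hs : PySem.Str.split₀ args with
  | nil => exact absurd hs h
  | cons w ws =>
    simp only []
    rw [pvAltLoop_eq_pLoop, pvA_list_eq_pos]
    cases hp : pvPos w.toList.zipIdx with
    | nil => simp [pvPLoop]
    | cons x xs =>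
      rw [pvPLoop_char]
      simp [pvMFold, pvMFold_some, PySem.List.max?_id_cons, List.foldl_append]

-- ===== VERDICT (by name: the statement is the Claim_ definition above) =====
theorem func_spec : Claim_equal_func := by
  intro args _ hpre
  exact func_eq_alt args hpre
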